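-- pv_equiv track=rewrite | github.com/jgandert/analyze_keystrokes | utils/pattern.py | permutations_of_pattern
-- ===== SOURCE A (Python) =====
-- from itertools import product
-- from typing import Union, Optional, Iterable
--
-- class OneOf:
--     def __init__(self, content):
--         self.size = 1
--         self.not_chosen_count = 0  # count
--         self.chosen = None
--         self.content = content
--         self.cur = 0  # can be used to keep track of which one we're processing
--
--     @property
--     def has_chosen(self):
--         return self.chosen is not None
--
--     def reset(self):
--         self.not_chosen_count = 0
--         self.chosen = None
--         self.cur = 0
--
--     def __repr__(self):
--         if self.has_chosen:
--             c = f'chosen={self.chosen}'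
--         else:
--             c = f'not_chosen_count={self.not_chosen_count}'
--         return f'OneOf<{hex(id(self))}>({c}, size={self.size}, content={repr(self.content)})'
--
--     def add_one(self):
--         self.size += 1
--
--     def deactivate(self):
--         """
--         Return False if all are False
--         """
--         if self.has_chosen:
--             raise ValueError("someone was already chosen")
--
--         self.not_chosen_count += 1
--         return self.not_chosen_count < self.size
--
--     def activate(self):
--         if self.has_chosen:
--             raise ValueError("someone was already chosen")
--
--         # if we deactivated 1, self.not_chosen would be 1
--         # so this is the index of the one we choose
--         self.chosen = self.not_chosen_count
--
-- def list_with_duplicates_as_one_of(pattern: Union[str, list[str]]) -> list[Union[str, OneOf]]: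
--     result = []
--     upper: dict[str, OneOf] = {}
--     for pi, p in enumerate(pattern):
--         if pattern.count(p) == 1:
--             result.append(p)
--         else:
--             en = upper.get(p)
--             if en is None:
--                 en = upper[p] = OneOf(p)
--             else:
--                 # we're using the same object again if it already exists
--                 en.add_one()
--             result.append(en)
--     return result
--
-- def permutations_of_pattern(pattern: str) -> list[str]:
--     """
--     If an uppercase letter in a pattern appears more than 2 times, the permutations here can have duplicates.
--
--     Consider 'fFpFPFhPnHNH'. For the following two cases (in brackets the one not chosen)
--
--     Chosen 1, 1, 0 of each alternative -> f(F)pF(PF)hPnHN(H) = 'fpFhPnHN'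
--     Chosen 2, 1, 0 of each alternative -> f(F)p(FP)FhPnHN(H) = 'fpFhPnHN'
--
--     Apart from those, fpFhPnNH will also appear twice for the same reason.
--     """
--     letter_or_one_of = list_with_duplicates_as_one_of(pattern)
--
--     all_one_of = []
--     for lo in letter_or_one_of:
--         if isinstance(lo, OneOf) and lo not in all_one_of:
--             all_one_of.append(lo)
--
--     result = []
--     for chosen in product(*[range(lo.size) for lo in all_one_of]):
--         r = ''
--         for lo, c in zip(all_one_of, chosen):
--             lo.reset()
--             lo.chosen = c
--
--         for lo in letter_or_one_of:
--             if isinstance(lo, OneOf):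
--                 if lo.cur == lo.chosen:
--                     r += lo.content
--                 lo.cur += 1
--             else:
--                 r += lo
--         result.append(r)
--     return result
-- ===== SOURCE B (Python) =====
-- from itertools import product
--
-- def permutations_of_pattern(pattern: str) -> list[str]:
--     # distinct chars in order of first appearance, with their occurrence positions
--     distinct = list(dict.fromkeys(pattern))
--     groups = [[i for i, ch in enumerate(pattern) if ch == c] for c in distinct]
--     dup_groups = [g for g in groups if len(g) > 1]
--     unique_pos = [g[0] for g in groups if len(g) == 1]
--     result = []
--     for choice in product(*(range(len(g)) for g in dup_groups)):
--         kept = sorted(unique_pos + [g[c] for g, c in zip(dup_groups, choice)])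
--         result.append(''.join(pattern[i] for i in kept))
--     return result
-- ===== Notes on version B (the rewrite author's own statement) =====
-- stated objective: simpler
-- what changed: Replaces the mutable OneOf objects and the per-combination counter re-walk of the pattern with precomputed occurrence-position lists per distinct char: each combination picks one position per duplicated char, and the output string is built directly from the sorted kept positions.
import Mathlib
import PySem

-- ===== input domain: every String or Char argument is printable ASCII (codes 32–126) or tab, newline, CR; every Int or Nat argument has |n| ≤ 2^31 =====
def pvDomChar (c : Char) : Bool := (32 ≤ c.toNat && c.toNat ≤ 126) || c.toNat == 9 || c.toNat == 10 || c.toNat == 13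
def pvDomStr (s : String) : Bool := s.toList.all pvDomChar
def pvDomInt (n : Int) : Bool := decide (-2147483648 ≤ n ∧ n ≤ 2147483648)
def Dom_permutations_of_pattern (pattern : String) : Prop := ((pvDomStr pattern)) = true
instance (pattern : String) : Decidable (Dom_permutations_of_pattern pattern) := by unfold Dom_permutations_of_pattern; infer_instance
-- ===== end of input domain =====

-- B replaces A's mutable OneOf objects and counter re-walk with per-char occurrence-position
-- lists: each combination picks one position per duplicated char and the string is read off
-- the sorted kept positions (objective: simpler).

-- itertools.product(*lists), in Python's order (rightmost advances fastest); used by both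
-- Pythons via `for … in product(...)`; exact for lists of lists.
def pyProduct {α : Type} : List (List α) → List (List α)
  | [] => [[]]
  | l :: ls => l.flatMap (fun x => (pyProduct ls).map (fun t => x :: t))

-- ===== PORT A =====
-- A OneOf object is identified by its content char (`upper` holds one object per char);
-- the pair state is (result list, size store): Sum.inl = plain char, Sum.inr c = the OneOf for c.
def pvTagStep (chars : List Char) (st : List (Sum Char Char) × PySem.Dict Char Nat) (p : Char) :
    List (Sum Char Char) × PySem.Dict Char Nat :=
  if PySem.List.count chars p = 1 then (st.1 ++ [Sum.inl p], st.2)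
  else match PySem.Dict.get? st.2 p with
    | none => (st.1 ++ [Sum.inr p], PySem.Dict.insert st.2 p 1)       -- upper[p] = OneOf(p), size 1
    | some sz => (st.1 ++ [Sum.inr p], PySem.Dict.insert st.2 p (sz + 1))  -- en.add_one()

-- `if isinstance(lo, OneOf) and lo not in all_one_of: all_one_of.append(lo)`
def pvAllStep (acc : List Char) (lo : Sum Char Char) : List Char :=
  match lo with
  | Sum.inl _ => acc
  | Sum.inr c => if acc.contains c then acc else acc ++ [c]

-- the inner re-walk of letter_or_one_of: state (r, cur-store); chosenD maps each OneOf to lo.chosen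
def pvWalkStep (chosenD : PySem.Dict Char Nat) (st : List Char × PySem.Dict Char Nat)
    (lo : Sum Char Char) : List Char × PySem.Dict Char Nat :=
  match lo with
  | Sum.inl p => (st.1 ++ [p], st.2)
  | Sum.inr c =>
      let cu := PySem.Dict.getD st.2 c 0
      ((if cu = PySem.Dict.getD chosenD c 0 then st.1 ++ [c] else st.1),
       PySem.Dict.insert st.2 c (cu + 1))

def permutations_of_pattern (pattern : String) : List String :=
  let chars := pattern.toList
  let bld := chars.foldl (pvTagStep chars) ([], PySem.Dict.empty)
  let all_one_of := bld.1.foldl pvAllStep []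
  let combos := pyProduct (all_one_of.map (fun c => List.range (PySem.Dict.getD bld.2 c 0)))
  combos.foldl (fun result chosen =>
    result ++ [String.ofList
      (bld.1.foldl
        (pvWalkStep ((all_one_of.zip chosen).foldl
          (fun d p => PySem.Dict.insert d p.1 p.2) PySem.Dict.empty))
        ([], PySem.Dict.empty)).1]) []

-- ===== PORT B =====
-- [i for i, ch in enumerate(pattern) if ch == c]
def pvOcc (chars : List Char) (c : Char) : List Int :=
  ((PySem.List.enumerate chars).filter (fun p => p.2 == c)).map (fun p => p.1)

def permutations_of_pattern_alt (pattern : String) : List String :=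
  let chars := pattern.toList
  let distinct := PySem.List.dedup chars
  let groups := distinct.map (pvOcc chars)
  let dup_groups := groups.filter (fun g => 1 < g.length)
  let unique_pos := (groups.filter (fun g => g.length == 1)).map (fun g => PySem.List.pyGetD g 0 0)
  let combos := pyProduct (dup_groups.map (fun g => List.range g.length))
  combos.foldl (fun result choice =>
    result ++ [String.ofList
      ((PySem.List.sorted
          (unique_pos ++ (dup_groups.zip choice).map (fun p => PySem.List.pyGetD p.1 (Int.ofNat p.2) 0))
          (fun x => x) false).map
        (fun i => PySem.List.pyGetD chars i ' '))]) []

-- ===== PRECONDITION & SPEC =====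
def Spec_permutations_of_pattern (pattern : String) (out : List String) : Prop := out = permutations_of_pattern_alt pattern
instance (pattern : String) (out : List String) : Decidable (Spec_permutations_of_pattern pattern out) := by unfold Spec_permutations_of_pattern; infer_instance

-- ===== CLAIM (what is proved, stated in full; the proofs are below) =====
def Claim_equal_permutations_of_pattern : Prop := ∀ (pattern : String), Dom_permutations_of_pattern pattern → Spec_permutations_of_pattern pattern (permutations_of_pattern pattern)

-- ===== LEMMAS AND PROOFS =====

-- the duplicated chars, in order of first appearance
def pvDups (chars : List Char) : List Char :=
  PySem.Set.ofList (chars.filter (fun c => !(PySem.List.count chars c == 1)))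

-- what A's re-walk keeps, processed list by list, `pre` = chars already walked
def pvRender (chars : List Char) (D : PySem.Dict Char Nat) : List Char → List Char → List Char
  | [], _ => []
  | x :: t, pre =>
      (if (PySem.List.count chars x == 1) || (PySem.List.count pre x == PySem.Dict.getD D x 0)
       then [x] else []) ++ pvRender chars D t (pre ++ [x])

-- keep position i (holding char c) iff c is unique or its occurrence index equals the choice
def pvSel (chars : List Char) (D : PySem.Dict Char Nat) (p : Int × Char) : Bool :=
  (PySem.List.count chars p.2 == 1)
    || (PySem.List.count (chars.take p.1.toNat) p.2 == PySem.Dict.getD D p.2 0)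

-- the chars A keeps / the indices B keeps, both read off the filtered enumeration
def pvTag (chars : List Char) (c : Char) : Sum Char Char :=
  if PySem.List.count chars c = 1 then Sum.inl c else Sum.inr c

def pvOccS (l : List Char) (s : Int) (c : Char) : List Int :=
  ((PySem.List.enumerate l s).filter (fun p => p.2 == c)).map (fun p => p.1)

theorem pvOcc_eq_occS (chars : List Char) (c : Char) : pvOcc chars c = pvOccS chars 0 c := rfl

theorem tag_fst (chars : List Char) :
    ∀ (l : List Char) (acc : List (Sum Char Char)) (d : PySem.Dict Char Nat),
    (l.foldl (pvTagStep chars) (acc, d)).1 = acc ++ l.map (pvTag chars) := by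
  intro l
  induction l with
  | nil => intro acc d; simp
  | cons x t ih =>
    intro acc d
    simp only [List.foldl_cons, List.map_cons, pvTagStep]
    split_ifs with h <;> rw [PySem.List.count_eq] at h
    · rw [ih]; simp [pvTag, h]
    · cases hg : PySem.Dict.get? d x <;> simp only [hg] <;> rw [ih] <;> simp [pvTag, h]

theorem tag_snd (chars : List Char) (c : Char) :
    ∀ (l : List Char) (acc : List (Sum Char Char)) (d : PySem.Dict Char Nat),
    ((l.foldl (pvTagStep chars) (acc, d)).2).get? c =
      if PySem.List.count chars c = 1 ∨ l.count c = 0 then d.get? c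
      else some (PySem.Dict.getD d c 0 + l.count c) := by
  intro l
  induction l with
  | nil => intro acc d; simp
  | cons x t ih =>
    intro acc d
    simp only [List.foldl_cons, pvTagStep]
    by_cases h : PySem.List.count chars x = 1
    · rw [if_pos h, ih]
      by_cases hxc : x = c
      · subst hxc
        have h' : List.count x chars = 1 := h
        simp [h']
      · rw [show List.count c (x :: t) = List.count c t from by simp [List.count_cons, hxc]]
    · rw [if_neg h]
      cases hg : PySem.Dict.get? d x <;> simp only [hg] <;> rw [ih]
      · by_cases hxc : x = c
        · subst hxc
          have h' : ¬ List.count x chars = 1 := h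
          have hd0 : PySem.Dict.getD d x 0 = 0 := by
            simp [PySem.Dict.getD_eq_get?_getD, hg]
          by_cases ht : t.count x = 0 <;>
            · simp [h', ht, hd0, PySem.Dict.get?_insert_self,
                PySem.Dict.getD_insert_self, List.count_cons_self]
              try omega
        · rw [show List.count c (x :: t) = List.count c t from by simp [List.count_cons, hxc]]
          simp [PySem.Dict.get?_insert, PySem.Dict.getD_insert, Ne.symm hxc]
      · rename_i sz
        by_cases hxc : x = c
        · subst hxc
          have h' : ¬ List.count x chars = 1 := h
          have hd0 : PySem.Dict.getD d x 0 = sz := by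
            simp [PySem.Dict.getD_eq_get?_getD, hg]
          by_cases ht : t.count x = 0 <;>
            · simp [h', ht, hd0, PySem.Dict.get?_insert_self,
                PySem.Dict.getD_insert_self, List.count_cons_self]
              try omega
        · rw [show List.count c (x :: t) = List.count c t from by simp [List.count_cons, hxc]]
          simp [PySem.Dict.get?_insert, PySem.Dict.getD_insert, Ne.symm hxc]

theorem all_one_of_eq (chars : List Char) :
    ∀ (l : List Char) (acc : List Char),
    ((l.map (pvTag chars)).foldl pvAllStep acc)
      = PySem.Set.update acc (l.filter (fun c => !(PySem.List.count chars c == 1))) := by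
  intro l
  induction l with
  | nil => intro acc; simp [PySem.Set.update]
  | cons x t ih =>
    intro acc
    simp only [List.map_cons, List.foldl_cons, pvTag]
    by_cases h : PySem.List.count chars x = 1
    · rw [PySem.List.count_eq] at h
      simp only [PySem.List.count_eq, h, if_pos rfl, pvAllStep]
      rw [ih]
      simp [h]
    · rw [PySem.List.count_eq] at h
      simp only [PySem.List.count_eq, if_neg h, pvAllStep]
      rw [ih]
      have : (!(List.count x chars == 1)) = true := by simp [h]
      simp only [List.filter_cons, this, if_pos rfl]
      rfl

theorem zip_fold_getD_notmem {ps : List (Char × Nat)} {c : Char} (d : PySem.Dict Char Nat)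
    (h : c ∉ ps.map Prod.fst) :
    PySem.Dict.getD (ps.foldl (fun d p => PySem.Dict.insert d p.1 p.2) d) c 0
      = PySem.Dict.getD d c 0 := by
  induction ps generalizing d with
  | nil => rfl
  | cons p t ih =>
    simp only [List.map_cons, List.mem_cons, not_or] at h
    simp only [List.foldl_cons]
    rw [ih (h := h.2), PySem.Dict.getD_insert, if_neg h.1]

theorem zip_fold_getD {ps : List (Char × Nat)} {c : Char} {v : Nat} (d : PySem.Dict Char Nat)
    (hnd : (ps.map Prod.fst).Nodup) (hm : (c, v) ∈ ps) :
    PySem.Dict.getD (ps.foldl (fun d p => PySem.Dict.insert d p.1 p.2) d) c 0 = v := by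
  induction ps generalizing d with
  | nil => cases hm
  | cons p t ih =>
    simp only [List.map_cons, List.nodup_cons] at hnd
    simp only [List.foldl_cons]
    rcases List.mem_cons.mp hm with he | hmt
    · subst he
      rw [zip_fold_getD_notmem _ (by simpa using hnd.1), PySem.Dict.getD_insert_self]
    · exact ih _ hnd.2 hmt

theorem walk_eq (chars : List Char) (D : PySem.Dict Char Nat) :
    ∀ (l pre r : List Char) (cur : PySem.Dict Char Nat),
    (∀ c, PySem.List.count chars c ≠ 1 → PySem.Dict.getD cur c 0 = pre.count c) →
    ((l.map (pvTag chars)).foldl (pvWalkStep D) (r, cur)).1 = r ++ pvRender chars D l pre := by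
  intro l
  induction l with
  | nil => intro pre r cur hinv; simp [pvRender]
  | cons x t ih =>
    intro pre r cur hinv
    simp only [List.map_cons, List.foldl_cons, pvTag]
    by_cases h : PySem.List.count chars x = 1
    · rw [if_pos h]
      show ((t.map (pvTag chars)).foldl (pvWalkStep D) (r ++ [x], cur)).1 = _
      rw [ih (pre ++ [x]) (r ++ [x]) cur]
      · rw [pvRender]
        simp [PySem.List.count_eq, show List.count x chars = 1 from h]
      · intro c hc
        rw [hinv c hc, List.count_append]
        have hne : c ≠ x := fun he => hc (he ▸ h)
        simp [List.count_singleton, Ne.symm hne]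
    · rw [if_neg h]
      have hcu : PySem.Dict.getD cur x 0 = pre.count x := hinv x h
      show ((t.map (pvTag chars)).foldl (pvWalkStep D)
        ((if PySem.Dict.getD cur x 0 = PySem.Dict.getD D x 0 then r ++ [x] else r),
          cur.insert x (PySem.Dict.getD cur x 0 + 1))).1 = _
      rw [ih (pre ++ [x])]
      · rw [pvRender]
        have h' : ¬ List.count x chars = 1 := h
        by_cases heq : pre.count x = PySem.Dict.getD D x 0
        · rw [hcu, if_pos heq]
          simp [PySem.List.count_eq, h', heq]
        · rw [hcu, if_neg heq]
          simp [PySem.List.count_eq, h', heq]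
      · intro c hc
        by_cases hcx : c = x
        · subst hcx
          rw [PySem.Dict.getD_insert_self, hcu, List.count_append]
          simp [List.count_singleton]
        · rw [PySem.Dict.getD_insert, if_neg hcx, hinv c hc, List.count_append]
          simp [List.count_singleton, Ne.symm hcx]

theorem render_eq (chars : List Char) (D : PySem.Dict Char Nat) :
    ∀ (l pre : List Char), chars = pre ++ l →
    pvRender chars D l pre
      = ((PySem.List.enumerate l (pre.length : Int)).filter (pvSel chars D)).map (fun p => p.2) := by
  intro l
  induction l with
  | nil => intro pre h; simp [pvRender, PySem.List.enumerate_nil]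
  | cons x t ih =>
    intro pre h
    rw [pvRender, PySem.List.enumerate_cons, List.filter_cons]
    have htake : chars.take ((pre.length : Int)).toNat = pre := by
      rw [Int.toNat_natCast, h, List.take_left]
    have hsel : pvSel chars D ((pre.length : Int), x)
        = ((PySem.List.count chars x == 1) || (PySem.List.count pre x == PySem.Dict.getD D x 0)) := by
      simp only [pvSel, htake]
    have ht : chars = (pre ++ [x]) ++ t := by simp [h]
    have ihx := ih (pre ++ [x]) ht
    have hstart : ((pre ++ [x]).length : Int) = (pre.length : Int) + 1 := by
      simp
    rw [hstart] at ihx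
    by_cases hc : ((PySem.List.count chars x == 1) || (PySem.List.count pre x == PySem.Dict.getD D x 0)) = true
    · rw [hsel.trans hc]
      simp only [PySem.List.count_eq, Bool.or_eq_true, beq_iff_eq] at hc
      simp [ihx, hc]
    · rw [Bool.not_eq_true] at hc
      rw [hsel.trans hc]
      simp only [PySem.List.count_eq, Bool.or_eq_false_iff, beq_eq_false_iff_ne, ne_eq] at hc
      simp [ihx, hc.1, hc.2]

theorem occS_cons (c x : Char) (t : List Char) (s : Int) :
    pvOccS (x :: t) s c = (if x == c then [s] else []) ++ pvOccS t (s + 1) c := by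
  simp only [pvOccS, PySem.List.enumerate_cons, List.filter_cons]
  by_cases hx : x = c <;> simp [hx]

theorem occS_length (c : Char) : ∀ (l : List Char) (s : Int), (pvOccS l s c).length = l.count c := by
  intro l
  induction l with
  | nil => intro s; simp [pvOccS]
  | cons x t ih =>
    intro s
    rw [occS_cons, List.count_cons]
    by_cases hx : x = c <;> simp [hx, ih]

theorem occS_getElem (c : Char) :
    ∀ (l : List Char) (s : Int) (k : Nat), k < (pvOccS l s c).length →
    ∃ j : Nat, ∃ hj : j < l.length, (pvOccS l s c)[k]? = some (s + (j : Int)) ∧ l[j] = c ∧ (l.take j).count c = k := by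
  intro l
  induction l with
  | nil => intro s k h; simp [pvOccS] at h
  | cons x t ih =>
    intro s k h
    rw [occS_cons] at h ⊢
    by_cases hx : x = c
    · subst hx
      simp only [beq_self_eq_true, if_true, List.singleton_append] at h ⊢
      match k with
      | 0 => exact ⟨0, by simp, by simp, by simp, by simp⟩
      | k + 1 =>
        obtain ⟨j, hj, hv, hc, hcnt⟩ := ih (s + 1) k (by simpa using h)
        refine ⟨j + 1, by simp only [List.length_cons]; omega, ?_, by simpa using hc, ?_⟩
        · rw [List.getElem?_cons_succ, hv]
          congr 1
          push_cast; ring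
        · rw [List.take_succ_cons, List.count_cons_self, hcnt]
    · have hxb : (x == c) = false := by simpa using hx
      simp only [hxb, Bool.false_eq_true, if_false, List.nil_append] at h ⊢
      obtain ⟨j, hj, hv, hc, hcnt⟩ := ih (s + 1) k h
      refine ⟨j + 1, by simp only [List.length_cons]; omega, ?_, by simpa using hc, ?_⟩
      · rw [hv]
        congr 1
        push_cast; ring
      · rw [List.take_succ_cons, List.count_cons, hcnt]
        simp [hx]

-- uniqueness of a position by its (char, occurrence-count) pair
theorem take_count_lt (chars : List Char) (c : Char) {j j' : Nat} (hj : j < chars.length)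
    (hc : chars[j] = c) (hlt : j < j') :
    (chars.take j).count c < (chars.take j').count c := by
  have h1 : chars.take (j + 1) = chars.take j ++ [c] := by
    rw [List.take_succ]
    simp [List.getElem?_eq_getElem hj, hc]
  have hpre : (chars.take j').take (j + 1) = chars.take (j + 1) := by
    rw [List.take_take]
    congr 1
    omega
  have h2 : (chars.take (j + 1)).count c ≤ (chars.take j').count c := by
    rw [← hpre]
    exact ((List.take_prefix _ _).sublist).count_le _
  rw [h1, List.count_append] at h2
  simpa using Nat.lt_of_lt_of_le (by simp) h2

theorem pos_unique (chars : List Char) (c : Char) {j j' : Nat} (hj : j < chars.length)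
    (hj' : j' < chars.length) (hc : chars[j] = c) (hc' : chars[j'] = c)
    (he : (chars.take j).count c = (chars.take j').count c) : j = j' := by
  rcases lt_trichotomy j j' with hlt | heq | hgt
  · exact absurd he (Nat.ne_of_lt (take_count_lt chars c hj hc hlt))
  · exact heq
  · exact absurd he.symm (Nat.ne_of_lt (take_count_lt chars c hj' hc' hgt))

theorem filter_add (p : Char → Bool) (s : List Char) (x : Char) :
    (PySem.Set.add s x).filter p = if p x then PySem.Set.add (s.filter p) x else s.filter p := by
  by_cases hm : x ∈ s
  · rw [PySem.Set.add_of_mem hm]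
    by_cases hp : p x
    · rw [if_pos hp, PySem.Set.add_of_mem (List.mem_filter.mpr ⟨hm, hp⟩)]
    · rw [if_neg hp]
  · rw [PySem.Set.add_of_not_mem hm, List.filter_append, List.filter_cons]
    by_cases hp : p x
    · rw [if_pos hp, if_pos hp,
        PySem.Set.add_of_not_mem (fun hmf => hm (List.mem_filter.mp hmf).1)]
      simp
    · simp [hp]

theorem dedup_filter (p : Char → Bool) (l : List Char) :
    (PySem.List.dedup l).filter p = PySem.List.dedup (l.filter p) := by
  have key : ∀ (l : List Char) (s : List Char),
      (l.foldl PySem.Set.add s).filter p = (l.filter p).foldl PySem.Set.add (s.filter p) := by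
    intro l
    induction l with
    | nil => intro s; simp
    | cons x t ih =>
      intro s
      simp only [List.foldl_cons, List.filter_cons]
      by_cases hp : p x
      · rw [ih, filter_add]
        simp [hp]
      · rw [ih, filter_add]
        simp [hp]
  rw [PySem.List.dedup_eq_ofList, PySem.List.dedup_eq_ofList,
    PySem.Set.ofList_eq_foldl, PySem.Set.ofList_eq_foldl, key]
  simp

theorem mem_pyProduct {α : Type} (ls : List (List α)) (t : List α) :
    t ∈ pyProduct ls ↔ List.Forall₂ (fun x l => x ∈ l) t ls := by
  induction ls generalizing t with
  | nil => simp [pyProduct, List.forall₂_nil_right_iff]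
  | cons l ls ih =>
    simp only [pyProduct, List.mem_flatMap, List.mem_map]
    constructor
    · rintro ⟨x, hx, t', ht', rfl⟩
      exact List.Forall₂.cons hx (ih t' |>.mp ht')
    · intro hf
      cases hf with
      | cons hx hrest => exact ⟨_, hx, _, (ih _).mpr hrest, rfl⟩

-- normal forms of the two ports
def pvRanges (chars : List Char) : List (List Nat) :=
  (pvDups chars).map (fun c => List.range (List.count c chars))

def pvDz (chars : List Char) (choice : List Nat) : PySem.Dict Char Nat :=
  ((pvDups chars).zip choice).foldl (fun d p => PySem.Dict.insert d p.1 p.2) PySem.Dict.empty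

def pvStrA (chars : List Char) (choice : List Nat) : String :=
  String.ofList
    (((PySem.List.enumerate chars 0).filter (pvSel chars (pvDz chars choice))).map (fun p => p.2))

def pvUniq (chars : List Char) : List Int :=
  ((PySem.List.dedup chars).filter (fun c => List.count c chars == 1)).map
    (fun c => PySem.List.pyGetD (pvOcc chars c) 0 0)

def pvStrB (chars : List Char) (choice : List Nat) : String :=
  String.ofList
    ((PySem.List.sorted
        (pvUniq chars ++ ((pvDups chars).zip choice).map
          (fun p => PySem.List.pyGetD (pvOcc chars p.1) (Int.ofNat p.2) 0))
        (fun x => x) false).map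
      (fun i => PySem.List.pyGetD chars i ' '))

theorem mem_pvDups (chars : List Char) (c : Char) :
    c ∈ pvDups chars ↔ c ∈ chars ∧ List.count c chars ≠ 1 := by
  simp [pvDups, PySem.Set.mem_ofList, List.mem_filter, PySem.List.count_eq]

theorem nodup_pvDups (chars : List Char) : (pvDups chars).Nodup := PySem.Set.nodup_ofList _

theorem normA (pattern : String) :
    permutations_of_pattern pattern
      = (pyProduct (pvRanges pattern.toList)).map (pvStrA pattern.toList) := by
  unfold permutations_of_pattern
  dsimp only
  set chars := pattern.toList with hch
  have hfst : (chars.foldl (pvTagStep chars) ([], PySem.Dict.empty)).1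
      = chars.map (pvTag chars) := by
    rw [tag_fst]; simp
  have hall : ((chars.foldl (pvTagStep chars) ([], PySem.Dict.empty)).1.foldl pvAllStep [])
      = pvDups chars := by
    rw [hfst, all_one_of_eq]
    simp [pvDups, PySem.Set.update_nil_left]
  have hsz : (pvDups chars).map
        (fun c => List.range (PySem.Dict.getD (chars.foldl (pvTagStep chars) ([], PySem.Dict.empty)).2 c 0))
      = pvRanges chars := by
    apply List.map_congr_left
    intro c hc
    obtain ⟨hmem, hcnt⟩ := (mem_pvDups chars c).mp hc
    have hpos : List.count c chars ≠ 0 := by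
      simp [List.count_eq_zero]
      exact hmem
    rw [PySem.Dict.getD_eq_get?_getD, tag_snd]
    rw [if_neg (by rw [PySem.List.count_eq]; tauto)]
    simp [PySem.Dict.getD_empty]
  rw [hall, hsz]
  rw [PySem.List.foldl_append_singleton_eq_map]
  simp only [List.nil_append]
  apply List.map_congr_left
  intro chosen _
  rw [hfst, walk_eq chars _ chars [] [] PySem.Dict.empty
    (by intro c _; simp [PySem.Dict.getD_empty]),
    render_eq chars _ chars [] rfl]
  simp only [List.nil_append, List.length_nil, Nat.cast_zero]
  rfl

theorem normB (pattern : String) :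
    permutations_of_pattern_alt pattern
      = (pyProduct (pvRanges pattern.toList)).map (pvStrB pattern.toList) := by
  unfold permutations_of_pattern_alt
  dsimp only
  set chars := pattern.toList with hch
  have hdup : ((PySem.List.dedup chars).map (pvOcc chars)).filter (fun g => 1 < g.length)
      = (pvDups chars).map (pvOcc chars) := by
    rw [List.filter_map]
    congr 1
    rw [List.filter_congr (q := fun c => !(List.count c chars == 1))]
    · rw [dedup_filter]
      simp [pvDups]
    · intro c hcm
      have hc : c ∈ chars := (PySem.List.mem_dedup _ _).mp hcm
      have h1 : 1 ≤ List.count c chars := List.count_pos_iff.mpr hc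
      simp only [Function.comp, pvOcc_eq_occS, occS_length]
      by_cases he : List.count c chars = 1
      · rw [he]
        decide
      · have hlt : 1 < List.count c chars := by omega
        simp [he, hlt]
  have huniq : (((PySem.List.dedup chars).map (pvOcc chars)).filter (fun g => g.length == 1)).map
        (fun g => PySem.List.pyGetD g 0 0)
      = pvUniq chars := by
    rw [List.filter_map, List.map_map]
    unfold pvUniq
    rw [List.filter_congr (q := fun c => List.count c chars == 1)]
    · simp [Function.comp]
    · intro c hcm
      simp only [Function.comp, pvOcc_eq_occS, occS_length]
  rw [hdup, huniq]
  have hranges : ((pvDups chars).map (pvOcc chars)).map (fun g => List.range g.length)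
      = pvRanges chars := by
    rw [List.map_map]
    apply List.map_congr_left
    intro c _
    simp only [Function.comp, pvOcc_eq_occS, occS_length]
  rw [hranges, PySem.List.foldl_append_singleton_eq_map]
  simp only [List.nil_append]
  apply List.map_congr_left
  intro choice _
  unfold pvStrB
  rw [List.zip_map_left, List.map_map]
  rfl

theorem occ_get (chars : List Char) (c : Char) (k : Nat) (hk : k < List.count c chars) :
    ∃ j : Nat, ∃ hj : j < chars.length,
      PySem.List.pyGetD (pvOcc chars c) (Int.ofNat k) 0 = (j : Int)
        ∧ chars[j] = c ∧ (chars.take j).count c = k := by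
  have hlen : k < (pvOccS chars 0 c).length := by rw [occS_length]; exact hk
  obtain ⟨j, hj, hv, hc, hcnt⟩ := occS_getElem c chars 0 k hlen
  refine ⟨j, hj, ?_, hc, hcnt⟩
  rw [pvOcc_eq_occS, show Int.ofNat k = (k : Int) from rfl, PySem.List.pyGetD_natCast,
    List.getD_eq_getElem?_getD, hv]
  simp

theorem take_count_zero (chars : List Char) (c : Char) {j : Nat} (hj : j < chars.length)
    (hc : chars[j] = c) (h1 : List.count c chars = 1) : (chars.take j).count c = 0 := by
  have hsplit : (chars.take j).count c + (chars.drop j).count c = 1 := by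
    rw [← List.count_append, List.take_append_drop, h1]
  have hdrop : 0 < (chars.drop j).count c := by
    apply List.count_pos_iff.mpr
    rw [List.drop_eq_getElem_cons hj, hc]
    exact List.mem_cons_self
  omega

theorem uniq_mem (chars : List Char) (i : Int) :
    i ∈ pvUniq chars ↔ ∃ j : Nat, ∃ hj : j < chars.length,
      i = (j : Int) ∧ List.count chars[j] chars = 1 := by
  unfold pvUniq
  simp only [List.mem_map, List.mem_filter, PySem.List.mem_dedup]
  constructor
  · rintro ⟨c, ⟨hcm, hcq⟩, rfl⟩
    have h1 : List.count c chars = 1 := by simpa using hcq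
    obtain ⟨j, hj, hv, hcj, _⟩ := occ_get chars c 0 (by omega)
    refine ⟨j, hj, ?_, by rw [hcj]; exact h1⟩
    rw [← hv]; rfl
  · rintro ⟨j, hj, rfl, h1⟩
    refine ⟨chars[j], ⟨List.getElem_mem _, by simpa using h1⟩, ?_⟩
    obtain ⟨j0, hj0, hv, hcj0, ht0⟩ := occ_get chars (chars[j]) 0 (by omega)
    have ht : (chars.take j).count (chars[j]) = 0 := take_count_zero chars _ hj rfl h1
    have hjj : j = j0 := pos_unique chars (chars[j]) hj hj0 rfl hcj0 (by rw [ht, ht0])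
    have hc0 : ((j0 : Nat) : Int) = ((j : Nat) : Int) := by exact_mod_cast hjj.symm
    exact hv.trans hc0

theorem dup_mem (chars : List Char) (D : PySem.Dict Char Nat)
    (hDlt : ∀ c ∈ pvDups chars, PySem.Dict.getD D c 0 < List.count c chars) (i : Int) :
    i ∈ (pvDups chars).map
        (fun c => PySem.List.pyGetD (pvOcc chars c) (Int.ofNat (PySem.Dict.getD D c 0)) 0)
      ↔ ∃ j : Nat, ∃ hj : j < chars.length,
        i = (j : Int) ∧ List.count chars[j] chars ≠ 1
          ∧ (chars.take j).count chars[j] = PySem.Dict.getD D chars[j] 0 := by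
  simp only [List.mem_map]
  constructor
  · rintro ⟨c, hcm, rfl⟩
    obtain ⟨j, hj, hv, hcj, hcnt⟩ := occ_get chars c _ (hDlt c hcm)
    exact ⟨j, hj, hv, by rw [hcj]; exact ((mem_pvDups chars c).mp hcm).2, by rw [hcj, hcnt]⟩
  · rintro ⟨j, hj, rfl, hne, hcnt⟩
    refine ⟨chars[j], (mem_pvDups chars _).mpr ⟨List.getElem_mem _, hne⟩, ?_⟩
    have hk : PySem.Dict.getD D chars[j] 0 < List.count chars[j] chars :=
      hDlt _ ((mem_pvDups chars _).mpr ⟨List.getElem_mem _, hne⟩)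
    obtain ⟨j0, hj0, hv, hcj0, ht0⟩ := occ_get chars (chars[j]) _ hk
    have hjj : j = j0 := pos_unique chars (chars[j]) hj hj0 rfl hcj0 (by rw [hcnt, ht0])
    have hc0 : ((j0 : Nat) : Int) = ((j : Nat) : Int) := by exact_mod_cast hjj.symm
    exact hv.trans hc0

theorem per_choice (chars : List Char) (choice : List Nat)
    (hf : List.Forall₂ (fun x l => x ∈ l) choice (pvRanges chars)) :
    pvStrA chars choice = pvStrB chars choice := by
  set D := pvDz chars choice with hD
  have hlen : choice.length = (pvDups chars).length := by
    have h := hf.length_eq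
    simpa [pvRanges] using h
  have hDk : ∀ (k : Nat) (hk : k < (pvDups chars).length),
      PySem.Dict.getD D ((pvDups chars)[k]) 0 = choice[k]'(by omega) := by
    intro k hk
    apply zip_fold_getD
    · rw [List.map_fst_zip (hlen.symm.le)]
      exact nodup_pvDups chars
    · have hkz : k < ((pvDups chars).zip choice).length := by
        rw [List.length_zip]
        omega
      have hz : ((pvDups chars).zip choice)[k]'hkz = ((pvDups chars)[k], choice[k]'(by omega)) :=
        List.getElem_zip
      rw [← hz]
      exact List.getElem_mem hkz
  have hchoose : ∀ (k : Nat) (hk : k < (pvDups chars).length),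
      choice[k]'(by omega) < List.count ((pvDups chars)[k]) chars := by
    intro k hk
    have h1 : k < choice.length := by omega
    have h2 : k < (pvRanges chars).length := by
      simp only [pvRanges, List.length_map]
      omega
    have hr := hf.get h1 h2
    simp only [pvRanges, List.get_eq_getElem, List.getElem_map, List.mem_range] at hr
    exact hr
  have hDlt : ∀ c ∈ pvDups chars, PySem.Dict.getD D c 0 < List.count c chars := by
    intro c hc
    obtain ⟨k, hk, rfl⟩ := List.getElem_of_mem hc
    rw [hDk k hk]
    exact hchoose k hk
  have hzip : ((pvDups chars).zip choice).map
        (fun p => PySem.List.pyGetD (pvOcc chars p.1) (Int.ofNat p.2) 0)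
      = (pvDups chars).map
        (fun c => PySem.List.pyGetD (pvOcc chars c) (Int.ofNat (PySem.Dict.getD D c 0)) 0) := by
    apply List.ext_getElem
    · simp only [List.length_map, List.length_zip]
      omega
    · intro k h1 h2
      simp only [List.getElem_map, List.getElem_zip]
      rw [hDk k (by simpa using h2)]
  have hKpw : (((PySem.List.enumerate chars 0).filter (pvSel chars D)).map
      (fun p => p.1)).Pairwise (· < ·) := by
    apply List.pairwise_map.mpr
    exact List.Pairwise.sublist List.filter_sublist (PySem.List.pairwise_lt_enumerate chars 0)
  have hKnd : (((PySem.List.enumerate chars 0).filter (pvSel chars D)).map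
      (fun p => p.1)).Nodup := hKpw.imp (fun h => ne_of_lt h)
  have memK : ∀ i : Int, i ∈ ((PySem.List.enumerate chars 0).filter (pvSel chars D)).map
        (fun p => p.1)
      ↔ ∃ j : Nat, ∃ hj : j < chars.length, i = (j : Int)
          ∧ pvSel chars D ((j : Int), chars[j]) = true := by
    intro i
    simp only [List.mem_map, List.mem_filter, PySem.List.mem_enumerate_iff]
    constructor
    · rintro ⟨p, ⟨⟨k, hk, rfl⟩, hsel⟩, rfl⟩
      exact ⟨k, hk, by simp, by simpa using hsel⟩
    · rintro ⟨j, hj, rfl, hsel⟩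
      exact ⟨((j : Int), chars[j]), ⟨⟨j, hj, by simp⟩, hsel⟩, rfl⟩
  have hsel_iff : ∀ (j : Nat) (hj : j < chars.length),
      pvSel chars D ((j : Int), chars[j]) = true
        ↔ (List.count chars[j] chars = 1
            ∨ (chars.take j).count chars[j] = PySem.Dict.getD D chars[j] 0) := by
    intro j hj
    simp [pvSel, PySem.List.count_eq, Int.toNat_natCast]
  have hnu : (pvUniq chars).Nodup := by
    unfold pvUniq
    apply List.Nodup.map_on ?_ ((PySem.List.nodup_dedup chars).filter _)
    intro x hx y hy he
    simp only [List.mem_filter, PySem.List.mem_dedup, beq_iff_eq] at hx hy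
    obtain ⟨jx, hjx, hvx, hcx, _⟩ := occ_get chars x 0 (by omega)
    obtain ⟨jy, hjy, hvy, hcy, _⟩ := occ_get chars y 0 (by omega)
    have he' : (jx : Int) = (jy : Int) := by
      rw [← hvx, ← hvy]
      exact he
    have hxy : jx = jy := by exact_mod_cast he'
    subst hxy
    exact hcx.symm.trans hcy
  have hnd : ((pvDups chars).map
      (fun c => PySem.List.pyGetD (pvOcc chars c) (Int.ofNat (PySem.Dict.getD D c 0)) 0)).Nodup := by
    apply List.Nodup.map_on ?_ (nodup_pvDups chars)
    intro x hx y hy he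
    obtain ⟨jx, hjx, hvx, hcx, _⟩ := occ_get chars x _ (hDlt x hx)
    obtain ⟨jy, hjy, hvy, hcy, _⟩ := occ_get chars y _ (hDlt y hy)
    rw [hvx, hvy] at he
    have hxy : jx = jy := by exact_mod_cast he
    subst hxy
    exact hcx.symm.trans hcy
  have hdisj : ∀ i ∈ pvUniq chars, i ∉ (pvDups chars).map
      (fun c => PySem.List.pyGetD (pvOcc chars c) (Int.ofNat (PySem.Dict.getD D c 0)) 0) := by
    intro i hiu hid
    obtain ⟨j, hj, rfl, h1⟩ := (uniq_mem chars i).mp hiu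
    obtain ⟨j', hj', hjj, hne, _⟩ := (dup_mem chars D hDlt _).mp hid
    have : j = j' := by exact_mod_cast hjj
    exact hne (this ▸ h1)
  have hLnd : (pvUniq chars ++ (pvDups chars).map
      (fun c => PySem.List.pyGetD (pvOcc chars c) (Int.ofNat (PySem.Dict.getD D c 0)) 0)).Nodup := by
    rw [List.nodup_append]
    exact ⟨hnu, hnd, fun a ha b hb he => hdisj a ha (he ▸ hb)⟩
  have hmem : ∀ i : Int,
      i ∈ ((PySem.List.enumerate chars 0).filter (pvSel chars D)).map (fun p => p.1)
        ↔ i ∈ pvUniq chars ++ (pvDups chars).map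
            (fun c => PySem.List.pyGetD (pvOcc chars c) (Int.ofNat (PySem.Dict.getD D c 0)) 0) := by
    intro i
    rw [memK, List.mem_append, uniq_mem, dup_mem chars D hDlt]
    constructor
    · rintro ⟨j, hj, rfl, hsel⟩
      rcases (hsel_iff j hj).mp hsel with h1 | h2
      · exact Or.inl ⟨j, hj, rfl, h1⟩
      · by_cases hc1 : List.count chars[j] chars = 1
        · exact Or.inl ⟨j, hj, rfl, hc1⟩
        · exact Or.inr ⟨j, hj, rfl, hc1, h2⟩
    · rintro (⟨j, hj, rfl, h1⟩ | ⟨j, hj, rfl, hne, h2⟩)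
      · exact ⟨j, hj, rfl, (hsel_iff j hj).mpr (Or.inl h1)⟩
      · exact ⟨j, hj, rfl, (hsel_iff j hj).mpr (Or.inr h2)⟩
  have hperm : (((PySem.List.enumerate chars 0).filter (pvSel chars D)).map
        (fun p => p.1)).Perm
      (pvUniq chars ++ (pvDups chars).map
        (fun c => PySem.List.pyGetD (pvOcc chars c) (Int.ofNat (PySem.Dict.getD D c 0)) 0)) :=
    (List.perm_ext_iff_of_nodup hKnd hLnd).mpr hmem
  have hsorted : PySem.List.sorted
      (pvUniq chars ++ (pvDups chars).map
        (fun c => PySem.List.pyGetD (pvOcc chars c) (Int.ofNat (PySem.Dict.getD D c 0)) 0))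
      (fun x => x) false
      = ((PySem.List.enumerate chars 0).filter (pvSel chars D)).map (fun p => p.1) :=
    PySem.List.sorted_eq_of_perm_of_pairwise_lt _ _ (fun x => x) hperm hKpw
  unfold pvStrA pvStrB
  rw [hzip, hsorted, List.map_map]
  congr 1
  apply List.map_congr_left
  intro p hp
  simp only [List.mem_filter, PySem.List.mem_enumerate_iff] at hp
  obtain ⟨⟨k, hk, rfl⟩, _⟩ := hp
  simp only [Function.comp]
  rw [show (0 : Int) + (k : Int) = (k : Int) by ring, PySem.List.pyGetD_natCast]
  exact (List.getD_eq_getElem _ _ hk).symm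

-- ===== VERDICT (by name: the statement is the Claim_ definition above) =====
theorem permutations_of_pattern_spec : Claim_equal_permutations_of_pattern := by
  intro pattern _
  unfold Spec_permutations_of_pattern
  rw [normA, normB]
  apply List.map_congr_left
  intro choice hm
  exact per_choice pattern.toList choice ((mem_pyProduct _ _).mp hm)
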